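-- pv_equiv track=rewrite | github.com/pypi-data/pypi-mirror-148 | packages/peu-bandoos/peu_bandoos-0.0.2-py3-none-any.whl/peu/core.py | dict_product
-- ===== SOURCE A (Python) =====
-- from itertools import product
-- from collections.abc import Iterable
-- from typing import List, Dict
--
-- def ensure_iterable(x):
--     if isinstance(x, Iterable):
--         return x
--     else:
--         return [x]
--
-- def merge_dicts(a, b):
--     return {**a, **b}
--
-- def dict_product(d: dict, fixed: dict = {}) -> List[Dict]:
--     """Generates cartesian product from a dict of parameter ranges.
--     So e.g. dic={'A':{1,2},'B':{true,false}} gives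
--     [{'A': 1, 'B': False},
--      {'A': 1, 'B': True },
--      {'A': 2, 'B': False},
--      {'A': 2, 'B': True }]
--
--     The input dict should contain an iterable as value, but be careful
--     to what is the result of iter(value) as for example having a dictionary as
--     value will return its keys and not the values!
--
--     So the suggestion is use sets or lists as values in `d`.
--     All values from `d` will be coerced to a set to remove duplicates,
--     so the order is not guaranteed.
--
--     If the any value in d is not iterable it will be wrapped in a
--     list, and thus result equal in all exapanded dicts.  It's also
--     possible to pass the `fixed` arg (another dict) whose key/vals
--     will be present in all expanded dicts. Be careful that values from `d`
--     take precedence in case of duplicate keys.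
--
--     """
--
--     assert isinstance(d, dict), "Input `d` must be a dictionary"
--     assert isinstance(fixed, dict), "Input `fixed` must be a dictionary"
--     ks = d.keys()
--     vs = d.values()
--     vs = [set(ensure_iterable(x)) for x in vs]
--     expanded = product(*vs)
--     return [merge_dicts(fixed, dict(zip(ks, tup))) for tup in expanded]
-- ===== SOURCE B (Python) =====
-- from collections.abc import Iterable
--
--
-- def dict_product(d: dict, fixed: dict = {}):
--     """Cartesian product of a dict of parameter ranges, as a list of dicts.
--
--     Iterative fold: start from [dict(fixed)] and extend every partial dict
--     with each deduplicated value of the next key.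
--     """
--     assert isinstance(d, dict), "Input `d` must be a dictionary"
--     assert isinstance(fixed, dict), "Input `fixed` must be a dictionary"
--     result = [dict(fixed)]
--     for k, v in d.items():
--         vals = set(v) if isinstance(v, Iterable) else {v}
--         result = [{**partial, k: val} for partial in result for val in vals]
--     return result
-- ===== Notes on version B (the rewrite author's own statement) =====
-- stated objective: simpler
-- what changed: Replaces itertools.product over the value sets plus per-tuple zip/dict/merge with a single insertion-order fold that extends the partial-dict list key by key ({**partial, k: v} with the value loop innermost), which yields the same dicts in the same order without product, zip or a merge helper.
import Mathlib
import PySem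

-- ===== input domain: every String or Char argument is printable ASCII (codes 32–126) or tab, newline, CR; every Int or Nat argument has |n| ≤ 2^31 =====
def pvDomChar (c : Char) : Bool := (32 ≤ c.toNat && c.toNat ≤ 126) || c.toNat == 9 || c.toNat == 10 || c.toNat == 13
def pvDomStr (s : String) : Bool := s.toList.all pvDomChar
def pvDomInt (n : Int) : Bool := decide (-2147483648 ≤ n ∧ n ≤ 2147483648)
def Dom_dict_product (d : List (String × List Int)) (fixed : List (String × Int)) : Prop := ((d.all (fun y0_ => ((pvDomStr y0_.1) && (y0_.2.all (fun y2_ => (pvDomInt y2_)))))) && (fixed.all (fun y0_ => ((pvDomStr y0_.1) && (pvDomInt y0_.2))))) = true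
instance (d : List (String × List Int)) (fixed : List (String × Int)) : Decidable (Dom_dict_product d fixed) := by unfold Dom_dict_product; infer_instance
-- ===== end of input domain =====

-- B replaces itertools.product + per-tuple dict merging by a single fold that extends the
-- result list key by key ({**partial, k: v}); same values, plainer decomposition (objective: simpler).


-- dict(pairs): a Python dict built by inserting the pairs in order (shared dict-literal primitive)
def pyDict (ps : List (String × Int)) : PySem.Dict String Int :=
  ps.foldl (fun dd kv => dd.insert kv.1 kv.2) PySem.Dict.empty

-- ===== PORT A =====
-- itertools.product(*vs): first list outermost, last fastest
def pyProduct : List (List Int) → List (List Int)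
  | [] => [[]]
  | v :: vs => v.flatMap (fun x => (pyProduct vs).map (fun t => x :: t))

-- merge_dicts(a, b) = {**a, **b}; a and b are dicts given as their item lists
def mergeDicts (a b : List (String × Int)) : List (String × Int) :=
  (b.foldl (fun dd kv => dd.insert kv.1 kv.2) (pyDict a)).items

def dict_product (d : List (String × List Int)) (fixed : List (String × Int)) : List (List (String × Int)) :=
  -- both asserts are true for arguments of the declared types
  let ks := d.map Prod.fst
  let vs := d.map Prod.snd
  -- ensure_iterable(x) = x (a list is iterable), so set(ensure_iterable(x)) = set(x)
  let vs2 := vs.map (fun x => PySem.Set.ofList x)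
  let expanded := pyProduct vs2
  expanded.map (fun tup => mergeDicts fixed (pyDict (ks.zip tup)).items)

-- ===== PORT B =====
def dict_product_alt (d : List (String × List Int)) (fixed : List (String × Int)) : List (List (String × Int)) :=
  let init := [pyDict fixed]    -- result = [dict(fixed)]
  (d.foldl
    (fun result kv =>
      result.flatMap (fun part => (PySem.Set.ofList kv.2).map (fun v => part.insert kv.1 v)))
    init).map PySem.Dict.items

-- ===== PRECONDITION & SPEC =====
-- Pre_ excludes association lists `d` with duplicate keys: they do not denote a Python dict
-- (dict construction collapses duplicates), so the pair list would not be d's item list.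
def Pre_dict_product (d : List (String × List Int)) (fixed : List (String × Int)) : Prop :=
  (d.map Prod.fst).Nodup
instance (d : List (String × List Int)) (fixed : List (String × Int)) : Decidable (Pre_dict_product d fixed) := by unfold Pre_dict_product; infer_instance

def pvWitness_dict_product : (List (String × List Int)) × (List (String × Int)) :=
  ([("a", [1, 2]), ("b", [3])], [("c", 0)])

def Spec_dict_product (d : List (String × List Int)) (fixed : List (String × Int)) (out : List (List (String × Int))) : Prop := out = dict_product_alt d fixed
instance (d : List (String × List Int)) (fixed : List (String × Int)) (out : List (List (String × Int))) : Decidable (Spec_dict_product d fixed out) := by unfold Spec_dict_product; infer_instance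

-- ===== CLAIM (what is proved, stated in full; the proofs are below) =====
def Claim_equal_dict_product : Prop := ∀ (d : List (String × List Int)) (fixed : List (String × Int)), Dom_dict_product d fixed → Pre_dict_product d fixed → Spec_dict_product d fixed (dict_product d fixed)

-- ===== LEMMAS AND PROOFS =====

-- the one step of B's fold, named for the lemmas
def stepB (result : List (PySem.Dict String Int)) (kv : String × List Int) : List (PySem.Dict String Int) :=
  result.flatMap (fun part => (PySem.Set.ofList kv.2).map (fun v => part.insert kv.1 v))

lemma foldl_stepB_append (rest : List (String × List Int)) (L1 L2 : List (PySem.Dict String Int)) :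
    rest.foldl stepB (L1 ++ L2) = rest.foldl stepB L1 ++ rest.foldl stepB L2 := by
  induction rest generalizing L1 L2 with
  | nil => rfl
  | cons kv rest ih =>
      simp only [List.foldl_cons]
      rw [show stepB (L1 ++ L2) kv = stepB L1 kv ++ stepB L2 kv from List.flatMap_append .., ih]

lemma foldl_stepB_map (rest : List (String × List Int)) (l : List Int)
    (g : Int → PySem.Dict String Int) :
    rest.foldl stepB (l.map g) = l.flatMap (fun x => rest.foldl stepB [g x]) := by
  induction l with
  | nil =>
      simp only [List.map_nil, List.flatMap_nil]
      induction rest with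
      | nil => rfl
      | cons kv rest ih => simpa [stepB] using ih
  | cons x l ih =>
      rw [show (x :: l).map g = [g x] ++ l.map g from by simp,
          foldl_stepB_append, ih, List.flatMap_cons]

-- main invariant: A's product-then-fold-into-D equals B's fold started at [D]
lemma main_inv (d : List (String × List Int)) (D : PySem.Dict String Int) :
    (pyProduct (d.map (fun p => PySem.Set.ofList p.2))).map
      (fun tup => (((d.map Prod.fst).zip tup).foldl (fun dd kv => dd.insert kv.1 kv.2) D).items)
    = (d.foldl stepB [D]).map PySem.Dict.items := by
  induction d generalizing D with
  | nil => rfl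
  | cons kv rest ih =>
      obtain ⟨k, v⟩ := kv
      simp only [List.map_cons, pyProduct, List.foldl_cons]
      rw [List.map_flatMap,
          show stepB [D] (k, v) = (PySem.Set.ofList v).map (fun x => D.insert k x) from by
            simp [stepB],
          foldl_stepB_map, List.map_flatMap]
      congr 1
      funext x
      rw [List.map_map, ← ih (D.insert k x)]
      rfl

lemma map_fst_zip_sublist {α β : Type} (l1 : List α) (l2 : List β) :
    ((l1.zip l2).map Prod.fst).Sublist l1 := by
  induction l1 generalizing l2 with
  | nil => simp
  | cons a l1 ih =>
      cases l2 with
      | nil => simp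
      | cons b l2 => simpa using (ih l2).cons₂ a

lemma items_pyDict_of_nodup (ps : List (String × Int)) (h : (ps.map Prod.fst).Nodup) :
    (pyDict ps).items = ps := by
  have := PySem.Dict.items_foldl_insert_fresh ps (fun a => a.1) (fun a => a.2)
    (d := PySem.Dict.empty)
    (by intro a _; simp) (by simpa using h)
  simpa [pyDict] using this

-- ===== VERDICT (by name: the statement is the Claim_ definition above) =====
theorem dict_product_spec : Claim_equal_dict_product := by
  intro d fixed _ hpre
  show dict_product d fixed = dict_product_alt d fixed
  unfold dict_product dict_product_alt
  simp only [List.map_map, Function.comp_def]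
  have hB : (d.foldl (fun result kv =>
      result.flatMap (fun part => (PySem.Set.ofList kv.2).map (fun v => part.insert kv.1 v)))
      [pyDict fixed]) = d.foldl stepB [pyDict fixed] := rfl
  rw [hB, ← main_inv d (pyDict fixed)]
  refine List.map_congr_left (fun tup _ => ?_)
  rw [mergeDicts, items_pyDict_of_nodup _
    (((map_fst_zip_sublist (d.map Prod.fst) tup)).nodup hpre), pyDict]
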